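-- pv_equiv track=rewrite | github.com/ShmnM/DigitClassifier | DigitClassification.py | countHolesInRow
-- ===== SOURCE A (Python) =====
-- def countHolesInRow(row):
--         holes = 0
--         in_hole = False
--
--         for i in range(len(row)- 1):
--                 if not in_hole and row[i] == 1 and row[i+1] == 0:
--                         in_hole = True
--                 elif in_hole and row[i] == 0 and row[i+1] == 1:
--                         holes += 1
--                         in_hole = False
--
--         #if in hole at end count it as well
--         if in_hole:
--                 holes += 1
--         # each hole is counted twice because of an entry and exit. integer division by 2 fixes this
--         return holes//2
-- ===== SOURCE B (Python) =====
-- def countHolesInRow(row):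
--         # boundary events between neighbouring cells:
--         # True for a fall (1 then 0), False for a rise (0 then 1)
--         events = [a == 1 for a, b in zip(row, row[1:]) if (a, b) in ((1, 0), (0, 1))]
--         # compress repeats: consecutive equal events (possible when other
--         # values lie between them) belong to the same phase of one hole
--         phases = []
--         for e in events:
--                 if not phases or phases[-1] != e:
--                         phases.append(e)
--         # two fall phases make up one counted hole
--         return sum(phases) // 2
-- ===== Notes on version B (the rewrite author's own statement) =====
-- stated objective: alternative
-- what changed: Replaces the in_hole boolean threaded through an index loop (with a trailing fixup) by a staged pipeline: extract the list of fall/rise boundary events from adjacent pairs, compress consecutive repeated events into phases with a run-compression loop, then sum the fall phases and halve.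
import Mathlib
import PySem

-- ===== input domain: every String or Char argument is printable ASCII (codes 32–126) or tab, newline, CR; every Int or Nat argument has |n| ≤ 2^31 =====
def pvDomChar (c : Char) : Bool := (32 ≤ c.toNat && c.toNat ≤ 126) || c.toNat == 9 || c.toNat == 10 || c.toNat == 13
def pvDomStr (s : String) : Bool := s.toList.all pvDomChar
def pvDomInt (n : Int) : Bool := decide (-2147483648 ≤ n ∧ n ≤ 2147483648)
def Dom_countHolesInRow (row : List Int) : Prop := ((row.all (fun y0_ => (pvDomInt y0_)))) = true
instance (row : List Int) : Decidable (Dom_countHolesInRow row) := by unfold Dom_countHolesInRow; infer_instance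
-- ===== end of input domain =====

-- B replaces A's in_hole state machine over indices by a three-stage pipeline (extract fall/rise
-- boundary events, compress consecutive repeats into phases, halve the fall-phase count): same cost, alternative structure.


-- ===== PORT A =====
-- loop body of A's for-loop (branches in A's order)
def stepA (st : Int × Bool) (a b : Int) : Int × Bool :=
  if !st.2 && a == 1 && b == 0 then (st.1, true)
  else if st.2 && a == 0 && b == 1 then (st.1 + 1, false)
  else st

def countHolesInRow (row : List Int) : Int :=
  -- indices i of range(len(row)-1) are always in range, so pyGetD with a dummy default is exact here
  let r := (PySem.List.pyRange 0 ((row.length : Int) - 1) 1).foldl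
      (fun st i => stepA st (PySem.List.pyGetD row i 0) (PySem.List.pyGetD row (i + 1) 0))
      ((0 : Int), false)
  let holes := if r.2 then r.1 + 1 else r.1
  PySem.Int.floordiv holes 2

-- ===== PORT B =====
-- the comprehension's guard+value: a kept pair yields (a == 1)
def transOf (p : Int × Int) : Option Bool :=
  if (p.1 == 1 && p.2 == 0) || (p.1 == 0 && p.2 == 1) then some (p.1 == 1) else none

-- body of B's compression loop ('phases[-1]' read with Python's -1 index)
def stepB (acc : List Bool) (e : Bool) : List Bool :=
  if acc.isEmpty || !(PySem.List.pyGetD acc (-1) false == e) then acc ++ [e] else acc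

def countHolesInRow_alt (row : List Int) : Int :=
  let events := (row.zip (PySem.List.slice row (some 1))).filterMap transOf
  let phases := events.foldl stepB []
  PySem.Int.floordiv ((phases.map (fun e => if e then (1 : Int) else 0)).sum) 2

-- ===== PRECONDITION & SPEC =====
def Spec_countHolesInRow (row : List Int) (out : Int) : Prop := out = countHolesInRow_alt row
instance (row : List Int) (out : Int) : Decidable (Spec_countHolesInRow row out) := by unfold Spec_countHolesInRow; infer_instance

-- ===== CLAIM (what is proved, stated in full; the proofs are below) =====
def Claim_equal_countHolesInRow : Prop := ∀ (row : List Int), Dom_countHolesInRow row → Spec_countHolesInRow row (countHolesInRow row)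

-- ===== LEMMAS AND PROOFS =====

-- B's event machine step, for relating A's pair loop to the event list
def feB (st : Int × Bool) (e : Bool) : Int × Bool :=
  if e && !st.2 then (st.1, true)
  else if !e && st.2 then (st.1 + 1, false)
  else st

-- structural form of B's compression: drop elements equal to the previous kept one
def ddAux (prev : Bool) : List Bool → List Bool
  | [] => []
  | e :: t => if e ≠ prev then e :: ddAux e t else ddAux e t

-- number of True entries of a Bool list, as B sums it
def sumT (l : List Bool) : Int := (l.map (fun e => if e then (1 : Int) else 0)).sum

-- A's index loop over row equals the same state machine run over adjacent pairs
theorem fold_idx (xs : List Int) : ∀ (st : Int × Bool),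
    (List.range (xs.length - 1)).foldl
        (fun st k => stepA st (xs.getD k 0) (xs.getD (k + 1) 0)) st
    = (xs.zip xs.tail).foldl (fun st p => stepA st p.1 p.2) st := by
  induction xs with
  | nil => intro st; simp
  | cons x xs ih =>
    intro st
    cases xs with
    | nil => simp
    | cons y t =>
      simp only [List.length_cons, Nat.add_sub_cancel, List.range_succ_eq_map,
        List.foldl_cons, List.foldl_map, List.tail_cons, List.zip_cons_cons]
      have := ih (stepA st ((x :: y :: t).getD 0 0) ((x :: y :: t).getD 1 0))
      simp only [List.length_cons, Nat.add_sub_cancel, List.tail_cons] at this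
      simpa [List.getD] using this

-- one step of A equals consuming the pair's event (if any) with the event machine
theorem step_trans (st : Int × Bool) (a b : Int) :
    stepA st a b = Option.elim (transOf (a, b)) st (feB st) := by
  unfold stepA transOf feB
  by_cases ha1 : a = 1 <;> by_cases hb0 : b = 0 <;>
    by_cases ha0 : a = 0 <;> by_cases hb1 : b = 1 <;>
    cases hst : st.2 <;> simp [ha1, hb0, ha0, hb1]

-- running A's step over pairs = running the event machine over the filtered events
theorem fold_events (ps : List (Int × Int)) : ∀ (st : Int × Bool),
    ps.foldl (fun st p => stepA st p.1 p.2) st = (ps.filterMap transOf).foldl feB st := by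
  induction ps with
  | nil => intro st; simp
  | cons p ps ih =>
    intro st
    obtain ⟨a, b⟩ := p
    rcases h : transOf (a, b) with _ | e
    · rw [List.foldl_cons, step_trans st a b, h, List.filterMap_cons_none h]
      exact ih _
    · rw [List.foldl_cons, step_trans st a b, h, List.filterMap_cons_some h,
        List.foldl_cons]
      exact ih _

-- phases[-1] of a nonempty accumulator is its last element
theorem pyGetD_neg_one_last (rs : List Bool) (p : Bool) :
    PySem.List.pyGetD (rs ++ [p]) (-1) false = p := by
  simp [PySem.List.pyGetD, PySem.List.pyGet?, PySem.List.pyIdx?]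

-- B's compression loop computes the structural de-duplication
theorem foldl_stepB (t : List Bool) : ∀ (rs : List Bool) (p : Bool),
    t.foldl stepB (rs ++ [p]) = (rs ++ [p]) ++ ddAux p t := by
  induction t with
  | nil => intro rs p; simp [ddAux]
  | cons e t ih =>
    intro rs p
    rw [List.foldl_cons]
    by_cases hep : e = p
    · subst hep
      have hs : stepB (rs ++ [e]) e = rs ++ [e] := by
        simp only [stepB, pyGetD_neg_one_last]
        simp
      rw [hs, ih rs e]
      simp [ddAux]
    · have hs : stepB (rs ++ [p]) e = (rs ++ [p]) ++ [e] := by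
        simp only [stepB, pyGetD_neg_one_last]
        simp [Ne.symm hep]
      rw [hs, ih (rs ++ [p]) e]
      simp [ddAux, hep]

-- the machine's final count (with the trailing in_hole fixup) counts fall phases relative to prior state p
theorem machine_count (ev : List Bool) : ∀ (h : Int) (p : Bool),
    (if (ev.foldl feB (h, p)).2 then (ev.foldl feB (h, p)).1 + 1 else (ev.foldl feB (h, p)).1)
    = h + (if p then 1 else 0) + sumT (ddAux p ev) := by
  induction ev with
  | nil => intro h p; cases p <;> simp [sumT, ddAux]
  | cons e t ih =>
    intro h p
    cases e <;> cases p <;>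
      simp [List.foldl_cons, feB, ddAux, sumT, ih] <;> ring

theorem countHolesInRow_eq_alt (row : List Int) :
    countHolesInRow row = countHolesInRow_alt row := by
  unfold countHolesInRow countHolesInRow_alt
  have hs : PySem.List.slice row (some 1) = row.tail := by
    rw [PySem.List.slice_from row (by omega)]; simp
  rw [hs]
  rw [PySem.List.pyRange_one]
  have hn : (((row.length : Int) - 1) - 0).toNat = row.length - 1 := by omega
  rw [hn, List.foldl_map]
  have hfun : (fun (st : Int × Bool) (k : Nat) =>
      stepA st (PySem.List.pyGetD row ((0 : Int) + ↑k) 0) (PySem.List.pyGetD row ((0 : Int) + ↑k + 1) 0))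
      = fun st k => stepA st (row.getD k 0) (row.getD (k + 1) 0) := by
    funext st k
    have h1 : ((0 : Int) + ↑k) = ((k : Nat) : Int) := by omega
    have h2 : ((k : Nat) : Int) + 1 = (((k + 1 : Nat)) : Int) := by push_cast; ring
    rw [h1, h2, PySem.List.pyGetD_natCast, PySem.List.pyGetD_natCast]
  rw [hfun, fold_idx, fold_events]
  simp only [machine_count]
  -- relate ddAux false events to B's foldl-built phase list
  rcases hev : (row.zip row.tail).filterMap transOf with _ | ⟨e, t⟩
  · simp [sumT, ddAux]
  · have hfold : (e :: t).foldl stepB [] = [e] ++ ddAux e t := by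
      rw [List.foldl_cons]
      have : stepB [] e = [e] := by simp [stepB]
      rw [this]
      simpa using foldl_stepB t [] e
    rw [hfold]
    cases e <;> simp [ddAux, sumT]

-- ===== VERDICT (by name: the statement is the Claim_ definition above) =====
theorem countHolesInRow_spec : Claim_equal_countHolesInRow := by
  intro row _
  unfold Spec_countHolesInRow
  exact countHolesInRow_eq_alt row
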